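-- pv_equiv track=rewrite | github.com/Djneto/S.P.C-CRIPTOGRAPHY | forcaBruta.py | aplicar_todas_as_rotacoes
-- ===== SOURCE A (Python) =====
-- import string
--
-- def rodar_letra(letra, numero):
--     if letra == '#':
--         return ' '
--
--     alfabeto = string.ascii_lowercase
--     tamanho_alfabeto = len(alfabeto)
--
--     if letra not in alfabeto:
--         return letra
--
--     indice_inicial = alfabeto.index(letra)
--     indice_novo = (indice_inicial - numero) % tamanho_alfabeto
--     return alfabeto[indice_novo]
--
-- def aplicar_todas_as_rotacoes(vetor_combinacoes):
--     resultado_final = []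
--     for combinacao in vetor_combinacoes:
--         tamanho = len(combinacao)
--         rotacoes_combinacao = []
--
--         for n in range(tamanho):
--             nova_combinacao = ''.join(rodar_letra(letra, n) for letra in combinacao)
--             rotacoes_combinacao.append(nova_combinacao)
--
--         resultado_final.append(rotacoes_combinacao)
--     return resultado_final
-- ===== SOURCE B (Python) =====
-- def _volta_um(c):
--     if 'a' <= c <= 'z':
--         return chr((ord(c) - ord('a') - 1) % 26 + ord('a'))
--     return c
--
-- def aplicar_todas_as_rotacoes(vetor_combinacoes):
--     resultado_final = []
--     for combinacao in vetor_combinacoes: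
--         rotacoes = []
--         atual = ''.join(' ' if c == '#' else c for c in combinacao)
--         for _ in range(len(combinacao)):
--             rotacoes.append(atual)
--             atual = ''.join(_volta_um(c) for c in atual)
--         resultado_final.append(rotacoes)
--     return resultado_final
-- ===== Notes on version B (the rewrite author's own statement) =====
-- stated objective: alternative
-- what changed: B builds rotation 0 once ('#'->' ') and then derives each subsequent rotation incrementally from the previous one by shifting every lowercase letter back one position with O(1) ord/chr arithmetic, instead of recomputing every rotation from the original string with an alphabet index lookup per (letter, n).
import Mathlib
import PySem

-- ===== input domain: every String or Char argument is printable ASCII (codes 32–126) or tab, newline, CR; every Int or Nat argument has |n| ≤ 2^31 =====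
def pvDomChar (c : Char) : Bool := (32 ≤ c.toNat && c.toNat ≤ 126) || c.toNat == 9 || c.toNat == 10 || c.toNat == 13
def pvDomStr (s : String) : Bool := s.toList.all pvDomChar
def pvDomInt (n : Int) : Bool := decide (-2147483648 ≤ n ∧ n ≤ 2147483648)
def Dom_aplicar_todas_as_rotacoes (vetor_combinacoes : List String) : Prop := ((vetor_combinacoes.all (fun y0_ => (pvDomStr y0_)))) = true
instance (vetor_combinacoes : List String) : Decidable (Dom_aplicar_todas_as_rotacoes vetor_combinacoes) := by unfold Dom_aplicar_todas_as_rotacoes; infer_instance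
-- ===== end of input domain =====

-- B derives each rotation incrementally from the previous one (shift every lowercase letter
-- back by 1) instead of recomputing every rotation from the original string with an
-- alphabet-index lookup per (letter, n); objective: alternative decomposition.

-- ===== PORT A =====
-- string.ascii_lowercase
def pvAlf : List Char :=
  ['a','b','c','d','e','f','g','h','i','j','k','l','m',
   'n','o','p','q','r','s','t','u','v','w','x','y','z']

def rodar_letra (letra : Char) (numero : Int) : Char :=
  if letra = '#' then ' '
  else
    let alfabeto := pvAlf
    let tamanho_alfabeto : Int := alfabeto.length
    if letra ∉ alfabeto then letra
    else
      -- letra ∈ alfabeto, so index? is some and the pyGet? index is in range: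
      -- the .getD defaults are never used
      let indice_inicial : Int := ((PySem.List.index? alfabeto letra).getD 0 : Nat)
      let indice_novo : Int := PySem.Int.mod (indice_inicial - numero) tamanho_alfabeto
      (PySem.List.pyGet? alfabeto indice_novo).getD letra

def aplicar_todas_as_rotacoes (vetor_combinacoes : List String) : List (List String) :=
  vetor_combinacoes.foldl (fun resultado_final combinacao =>
    let tamanho : Int := combinacao.toList.length
    let rotacoes_combinacao := (PySem.List.pyRange 0 tamanho 1).foldl
      (fun acc n =>
        acc ++ [String.mk (combinacao.toList.map (fun letra => rodar_letra letra n))]) []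
    resultado_final ++ [rotacoes_combinacao]) []

-- ===== PORT B =====
def volta_um (c : Char) : Char :=
  if 'a' ≤ c ∧ c ≤ 'z' then
    Char.ofNat ((PySem.Int.mod ((c.toNat : Int) - ('a'.toNat : Int) - 1) 26).toNat + 'a'.toNat)
  else c

-- the inner 'for _ in range(len(combinacao))' loop of Source B
def pvGo : Nat → List Char → List String
  | 0, _ => []
  | k + 1, atual => String.mk atual :: pvGo k (atual.map volta_um)

def aplicar_todas_as_rotacoes_alt (vetor_combinacoes : List String) : List (List String) :=
  vetor_combinacoes.map (fun combinacao =>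
    let atual := combinacao.toList.map (fun c => if c = '#' then ' ' else c)
    pvGo combinacao.toList.length atual)

-- ===== PRECONDITION & SPEC =====
def Spec_aplicar_todas_as_rotacoes (vetor_combinacoes : List String) (out : List (List String)) : Prop := out = aplicar_todas_as_rotacoes_alt vetor_combinacoes
instance (vetor_combinacoes : List String) (out : List (List String)) : Decidable (Spec_aplicar_todas_as_rotacoes vetor_combinacoes out) := by unfold Spec_aplicar_todas_as_rotacoes; infer_instance

-- ===== CLAIM (what is proved, stated in full; the proofs are below) =====
def Claim_equal_aplicar_todas_as_rotacoes : Prop := ∀ (vetor_combinacoes : List String), Dom_aplicar_todas_as_rotacoes vetor_combinacoes → Spec_aplicar_todas_as_rotacoes vetor_combinacoes (aplicar_todas_as_rotacoes vetor_combinacoes)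

-- ===== LEMMAS AND PROOFS =====

theorem mem_alf_iff (c : Char) : c ∈ pvAlf ↔ 97 ≤ c.toNat ∧ c.toNat ≤ 122 := by
  constructor
  · intro h; fin_cases h <;> decide
  · rintro ⟨h1, h2⟩
    have hc : c = Char.ofNat c.toNat := (Char.ofNat_toNat c).symm
    rw [hc]
    generalize c.toNat = k at h1 h2
    interval_cases k <;> decide

theorem index_alf (c : Char) (h : c ∈ pvAlf) :
    PySem.List.index? pvAlf c = some (c.toNat - 97) := by
  fin_cases h <;> decide

theorem get_alf (j : Int) (h0 : 0 ≤ j) (h1 : j < 26) :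
    PySem.List.pyGet? pvAlf j = some (Char.ofNat (j.toNat + 97)) := by
  interval_cases j <;> decide

theorem toNat_ofNat_small (m : Nat) (h : m < 1000) : (Char.ofNat m).toNat = m := by
  rw [Char.toNat_ofNat, if_pos]
  exact Or.inl (by omega)

-- characterisation of A's per-character rotation
theorem rodar_char (c : Char) (n : Int) :
    rodar_letra c n =
      if c = '#' then ' '
      else if 97 ≤ c.toNat ∧ c.toNat ≤ 122 then
        Char.ofNat ((((c.toNat : Int) - 97 - n) % 26).toNat + 97)
      else c := by
  unfold rodar_letra
  by_cases h : c = '#'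
  · simp [h]
  · rw [if_neg h, if_neg h]
    by_cases hm : c ∈ pvAlf
    · have hb := (mem_alf_iff c).1 hm
      rw [if_neg (by simpa using hm), if_pos hb]
      rw [index_alf c hm]
      have hlen : ((pvAlf.length : Nat) : Int) = 26 := by decide
      simp only [Option.getD_some, hlen]
      rw [PySem.Int.mod_eq_emod_of_pos (by norm_num)]
      have hcast : (((c.toNat - 97 : Nat) : Int)) = (c.toNat : Int) - 97 := by omega
      rw [hcast]
      set j : Int := ((c.toNat : Int) - 97 - n)% 26 with hj
      have hj0 : 0 ≤ j := Int.emod_nonneg _ (by norm_num)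
      have hj1 : j < 26 := Int.emod_lt_of_pos _ (by norm_num)
      rw [get_alf j hj0 hj1, Option.getD_some]
    · rw [if_pos (by simpa using hm), if_neg (by rw [← mem_alf_iff]; exact hm)]

-- one incremental step equals increasing A's shift by one
theorem char_le_iff (a b : Char) : a ≤ b ↔ a.toNat ≤ b.toNat := by
  rw [Char.le_def, UInt32.le_iff_toNat_le]
  exact Iff.rfl

theorem charStep (c : Char) (n : Int) :
    volta_um (rodar_letra c n) = rodar_letra c (n + 1) := by
  rw [rodar_char c n, rodar_char c (n + 1)]
  by_cases h : c = '#'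
  · simp only [h, if_pos]; decide
  · rw [if_neg h, if_neg h]
    by_cases hb : 97 ≤ c.toNat ∧ c.toNat ≤ 122
    · rw [if_pos hb, if_pos hb]
      set m : Nat := (((c.toNat : Int) - 97 - n) % 26).toNat with hm
      have hm26 : m < 26 := by omega
      have htn : (Char.ofNat (m + 97)).toNat = m + 97 := toNat_ofNat_small _ (by omega)
      have ha : 'a'.toNat = 97 := by decide
      have hz : 'z'.toNat = 122 := by decide
      have hcond : 'a' ≤ Char.ofNat (m + 97) ∧ Char.ofNat (m + 97) ≤ 'z' := by
        constructor
        · rw [char_le_iff, htn]; omega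
        · rw [char_le_iff, htn]; omega
      unfold volta_um
      rw [if_pos hcond]
      rw [PySem.Int.mod_eq_emod_of_pos (by norm_num)]
      apply congrArg Char.ofNat
      rw [htn, ha]
      omega
    · rw [if_neg hb, if_neg hb]
      have ha : 'a'.toNat = 97 := by decide
      have hz : 'z'.toNat = 122 := by decide
      have hcond : ¬('a' ≤ c ∧ c ≤ 'z') := by
        intro hc
        rw [char_le_iff, char_le_iff] at hc
        exact hb ⟨by omega, by omega⟩
      unfold volta_um
      rw [if_neg hcond]

-- rotation 0 of B equals A's rotation 0 per character
theorem fix0 (c : Char) : (if c = '#' then ' ' else c) = rodar_letra c 0 := by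
  rw [rodar_char c 0]
  by_cases h : c = '#'
  · simp [h]
  · rw [if_neg h, if_neg h]
    by_cases hb : 97 ≤ c.toNat ∧ c.toNat ≤ 122
    · rw [if_pos hb]
      have : (((c.toNat : Int) - 97 - 0) % 26).toNat + 97 = c.toNat := by omega
      rw [this, Char.ofNat_toNat]
    · rw [if_neg hb]

theorem pvGo_eq (k : Nat) : ∀ (n : Nat) (cs : List Char),
    pvGo k (cs.map (fun c => rodar_letra c (n : Int))) =
      (List.range k).map (fun (i : Nat) => String.mk (cs.map (fun c => rodar_letra c ((n + i : Nat) : Int)))) := by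
  induction k with
  | zero => intro n cs; simp [pvGo]
  | succ k ih =>
    intro n cs
    rw [List.range_succ_eq_map, List.map_cons, List.map_map]
    unfold pvGo
    rw [List.map_map]
    congr 1
    have hstep : cs.map (volta_um ∘ fun c => rodar_letra c (n : Int)) =
        cs.map (fun c => rodar_letra c ((n + 1 : Nat) : Int)) := by
      apply List.map_congr_left
      intro c _
      show volta_um (rodar_letra c (n : Int)) = rodar_letra c ((n + 1 : Nat) : Int)
      rw [charStep]
      norm_num
    rw [hstep, ih (n + 1) cs]
    apply List.map_congr_left
    intro i _
    show String.mk (cs.map (fun c => rodar_letra c ((n + 1 + i : Nat) : Int))) =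
      String.mk (cs.map (fun c => rodar_letra c ((n + (i + 1) : Nat) : Int)))
    have harg : n + 1 + i = n + (i + 1) := by omega
    rw [harg]

theorem foldl_app {α β : Type} (f : α → β) : ∀ (l : List α) (acc : List β),
    l.foldl (fun a x => a ++ [f x]) acc = acc ++ l.map f := by
  intro l
  induction l with
  | nil => intro acc; simp
  | cons x xs ih => intro acc; simp [ih]

-- A's inner loop in map form
theorem innerA (cs : List Char) :
    (PySem.List.pyRange 0 (cs.length : Int) 1).foldl
      (fun acc n => acc ++ [String.mk (cs.map (fun letra => rodar_letra letra n))]) [] =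
    (List.range cs.length).map (fun (k : Nat) => String.mk (cs.map (fun c => rodar_letra c (k : Int)))) := by
  rw [PySem.List.pyRange_one]
  have h1 : ((cs.length : Int) - 0).toNat = cs.length := by omega
  rw [h1]
  rw [foldl_app (fun n => String.mk (cs.map (fun letra => rodar_letra letra n)))]
  rw [List.nil_append, List.map_map]
  apply List.map_congr_left
  intro k _
  show String.mk (cs.map (fun letra => rodar_letra letra ((0 : Int) + (k : Int)))) =
    String.mk (cs.map (fun c => rodar_letra c (k : Int)))
  rw [Int.zero_add]

-- ===== VERDICT (by name: the statement is the Claim_ definition above) =====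
theorem aplicar_todas_as_rotacoes_spec : Claim_equal_aplicar_todas_as_rotacoes := by
  intro v _
  show aplicar_todas_as_rotacoes v = aplicar_todas_as_rotacoes_alt v
  unfold aplicar_todas_as_rotacoes aplicar_todas_as_rotacoes_alt
  simp only []
  rw [foldl_app (fun (combinacao : String) =>
    (PySem.List.pyRange 0 ((combinacao.toList.length : Nat) : Int) 1).foldl
      (fun acc n => acc ++ [String.mk (combinacao.toList.map (fun letra => rodar_letra letra n))]) [])]
  rw [List.nil_append]
  apply List.map_congr_left
  intro s _
  show (PySem.List.pyRange 0 ((s.toList.length : Nat) : Int) 1).foldl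
      (fun acc n => acc ++ [String.mk (s.toList.map (fun letra => rodar_letra letra n))]) [] =
    pvGo s.toList.length (s.toList.map (fun c => if c = '#' then ' ' else c))
  rw [innerA s.toList]
  have hB : s.toList.map (fun c => if c = '#' then ' ' else c) =
      s.toList.map (fun c => rodar_letra c ((0 : Nat) : Int)) := by
    apply List.map_congr_left
    intro c _
    simpa using fix0 c
  rw [hB, pvGo_eq s.toList.length 0 s.toList]
  apply List.map_congr_left
  intro i _
  show String.mk (s.toList.map (fun c => rodar_letra c (i : Int))) =
    String.mk (s.toList.map (fun c => rodar_letra c ((0 + i : Nat) : Int)))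
  have : 0 + i = i := by omega
  rw [this]
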